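-- pv_equiv track=rewrite | github.com/resonating-sirsh/res-data-app | res/learn/optimization/packing/annealed/packing_geometry.py | combine_frontier
-- ===== SOURCE A (Python) =====
-- def interpolate(seg, x):
--     return round(seg[1] + (seg[3] - seg[1]) * (x - seg[0]) / (seg[2] - seg[0]))
--
-- def combine_frontier(segs, x0, x1, frontier):
--     """
--     Given a frontier of line segments which all cover disjoint parts of the x-axis,
--     add in the new segments and remove what was in the extents (x0, x1)
--     """
--     new_frontier = []
--     added = False
--     for p in frontier:
--         px0, py0, px1, py1 = p
--         if px0 < x0 and px1 > x1:
--             # seg splits p p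
--             if px0 != x0:
--                 new_frontier.append((px0, py0, x0, interpolate(p, x0)))
--             new_frontier.extend(segs)
--             if px1 != x1:
--                 new_frontier.append((x1, interpolate(p, x1), px1, py1))
--             added = True
--         elif px0 < x0 and px1 > x0:
--             # seg covers right end of p
--             if px0 != x0:
--                 new_frontier.append((px0, py0, x0, interpolate(p, x0)))
--             if not added:
--                 new_frontier.extend(segs)
--                 added = True
--         elif px0 < x1 and px1 > x1:
--             # seg covers left end of p
--             if not added:
--                 new_frontier.extend(segs)
--                 added = True
--             if px1 != x1:
--                 new_frontier.append((x1, interpolate(p, x1), px1, py1))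
--         elif px0 >= x1 or px1 <= x0:
--             new_frontier.append(p)
--     if not added:
--         # new segments must have exactly covered some set of existing segments
--         new_frontier.extend(segs)
--         new_frontier = sorted(new_frontier, key=lambda p: p[0])
--     for i in range(1, len(new_frontier)):
--         if new_frontier[i][0] > new_frontier[i - 1][2]:
--             raise ValueError(f"Bad frontier {new_frontier}")
--     return new_frontier
-- ===== SOURCE B (Python) =====
-- def interpolate(seg, x):
--     return round(seg[1] + (seg[3] - seg[1]) * (x - seg[0]) / (seg[2] - seg[0]))
--
--
-- def combine_frontier(segs, x0, x1, frontier):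
--     """
--     Given a frontier of line segments which all cover disjoint parts of the x-axis,
--     add in the new segments and remove what was in the extents (x0, x1)
--     """
--     mid_l = next((p for p in frontier if p[0] < x0 < p[2]), None)
--     mid_r = next((p for p in frontier if p[0] < x1 < p[2]), None)
--     if mid_l is None and mid_r is None:
--         # new segments exactly covered some existing segments (or none)
--         result = sorted([p for p in frontier if p[0] >= x1 or p[2] <= x0] + list(segs),
--                         key=lambda p: p[0])
--     else:
--         result = [p for p in frontier if p[2] <= x0]
--         if mid_l is not None:
--             result.append((mid_l[0], mid_l[1], x0, interpolate(mid_l, x0)))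
--         result += list(segs)
--         if mid_r is not None:
--             result.append((x1, interpolate(mid_r, x1), mid_r[2], mid_r[3]))
--         result += [p for p in frontier if p[0] >= x1]
--     for i in range(1, len(result)):
--         if result[i][0] > result[i - 1][2]:
--             raise ValueError(f"Bad frontier {result}")
--     return result
-- ===== Notes on version B (the rewrite author's own statement) =====
-- stated objective: simpler
-- what changed: A's stateful single pass (accumulator list + 'added' flag with five interleaved branches) is replaced by a declarative decomposition: find the (unique, on the documented domain) segments straddling x0 and x1, filter the kept left/right segments, and assemble left + left-clip + segs + right-clip + right in one expression, using the module's interpolate for the clip y-values; the no-straddler sorted fallback and the ValueError adjacency check are kept as in A.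
-- outside the precondition, e.g. on combine_frontier([], 1, 0, [(0, 0, 1, 0)]): A returns [(0, 0, 1, 0), (0, 0, 1, 0)], B returns [(0, 0, 1, 0)]
import Mathlib
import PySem

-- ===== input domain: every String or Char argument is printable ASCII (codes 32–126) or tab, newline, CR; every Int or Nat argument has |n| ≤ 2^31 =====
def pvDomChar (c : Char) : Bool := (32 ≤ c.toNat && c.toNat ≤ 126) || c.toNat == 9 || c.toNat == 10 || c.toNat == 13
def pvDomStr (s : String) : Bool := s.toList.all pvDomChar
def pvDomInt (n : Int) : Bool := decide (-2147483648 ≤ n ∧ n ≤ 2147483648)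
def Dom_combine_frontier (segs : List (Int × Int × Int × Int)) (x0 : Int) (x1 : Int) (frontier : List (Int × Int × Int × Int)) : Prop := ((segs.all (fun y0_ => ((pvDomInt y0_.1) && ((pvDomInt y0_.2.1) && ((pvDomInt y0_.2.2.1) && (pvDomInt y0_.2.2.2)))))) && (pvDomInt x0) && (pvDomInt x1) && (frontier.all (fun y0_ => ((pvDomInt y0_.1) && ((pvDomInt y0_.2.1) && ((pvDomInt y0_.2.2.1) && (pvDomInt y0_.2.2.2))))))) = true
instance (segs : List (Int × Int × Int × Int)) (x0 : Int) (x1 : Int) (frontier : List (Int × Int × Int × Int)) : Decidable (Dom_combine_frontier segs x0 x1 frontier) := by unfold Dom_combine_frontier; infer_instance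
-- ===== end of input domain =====

-- B replaces A's stateful single pass (accumulator list + 'added' flag) by a declarative
-- decomposition (two find?s for the straddling segments, filters for the kept sides, one
-- assembly), reusing the module's interpolate for the clips; objective: simpler.


-- ===== PORT A =====
-- interpolate(seg, x) = round(seg1 + (seg3-seg1)*(x-seg0)/(seg2-seg0)).  Python computes
-- this with IEEE doubles; the helpers below model that arithmetic EXACTLY in integers:
-- correctly-rounded (half-to-even, 53-bit) double of an int/int quotient, exact float
-- addition of the (exactly representable, |seg1| ≤ 2^31) int seg1, then round() half-even.
-- Exact for den = seg2-seg0 > 0 (all calls under Pre_; in-range magnitudes never overflow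
-- a double and never reach subnormals).

-- round n/d half to even, d > 0
def rhe (n d : Int) : Int :=
  let q := Int.fdiv n d
  let r := n - q * d
  if 2*r > d ∨ (2*r = d ∧ Int.fmod q 2 = 1) then q+1 else q

-- a, b > 0: nearest double of a/b as (m, e) with value m*2^e and 2^52 ≤ m < 2^53
def rnd53core (a b : Nat) : Int × Int :=
  let s : Int := 52 - ((Nat.log2 a : Int) - (Nat.log2 b : Int))
  let sc : Int → Int := fun t =>
    if 0 ≤ t then rhe ((a : Int) * 2^t.toNat) b else rhe a ((b : Int) * 2^(-t).toNat)
  let m0 := sc s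
  if m0 < 2^52 then
    let m1 := sc (s+1)
    if m1 = 2^53 then (2^52, -s) else (m1, -(s+1))
  else if m0 ≥ 2^53 then (sc (s-1), -(s-1))
  else (m0, -s)

-- d > 0: nearest double of n/d as (m, e)
def rnd53 (n d : Int) : Int × Int :=
  if n = 0 then (0, 0)
  else
    let me := rnd53core n.natAbs d.natAbs
    (if n < 0 then -me.1 else me.1, me.2)

def interpolate (seg : Int × Int × Int × Int) (x : Int) : Int :=
  let den := seg.2.2.1 - seg.1
  let num := (seg.2.2.2 - seg.2.1) * (x - seg.1)
  let q := rnd53 num den                       -- the double num/den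
  let k : Nat := (max 0 (-q.2)).toNat
  let nsum := seg.2.1 * 2^k + q.1 * 2^(((k : Int) + q.2).toNat)
  let s := rnd53 nsum (2^k)                    -- the double seg1 + q
  if 0 ≤ s.2 then s.1 * 2^s.2.toNat else rhe s.1 (2^((-s.2).toNat))   -- round()

-- one iteration of A's 'for p in frontier' loop over the state (new_frontier, added)
def stepA (segs : List (Int × Int × Int × Int)) (x0 x1 : Int)
    (st : List (Int × Int × Int × Int) × Bool) (p : Int × Int × Int × Int) :
    List (Int × Int × Int × Int) × Bool :=
  if p.1 < x0 ∧ x1 < p.2.2.1 then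
    (st.1 ++ (if p.1 ≠ x0 then [(p.1, p.2.1, x0, interpolate p x0)] else []) ++ segs
          ++ (if p.2.2.1 ≠ x1 then [(x1, interpolate p x1, p.2.2.1, p.2.2.2)] else []), true)
  else if p.1 < x0 ∧ x0 < p.2.2.1 then
    (st.1 ++ (if p.1 ≠ x0 then [(p.1, p.2.1, x0, interpolate p x0)] else [])
          ++ (if st.2 then [] else segs), true)
  else if p.1 < x1 ∧ x1 < p.2.2.1 then
    (st.1 ++ (if st.2 then [] else segs)
          ++ (if p.2.2.1 ≠ x1 then [(x1, interpolate p x1, p.2.2.1, p.2.2.2)] else []), true)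
  else if x1 ≤ p.1 ∨ p.2.2.1 ≤ x0 then
    (st.1 ++ [p], st.2)
  else st

def combine_frontier (segs : List (Int × Int × Int × Int)) (x0 : Int) (x1 : Int) (frontier : List (Int × Int × Int × Int)) : List (Int × Int × Int × Int) :=
  let st := frontier.foldl (stepA segs x0 x1) ([], false)
  -- 'if not added: extend segs and sort by p[0]'
  -- Python then runs the adjacency check, which raises ValueError on a gap and otherwise
  -- returns the list unchanged; Pre_ excludes the raising inputs, so it alters no value.
  if st.2 then st.1 else PySem.List.sorted (st.1 ++ segs) (fun p => p.1)

-- ===== PORT B =====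
-- p[0] < x < p[2]
def isStradAt (x : Int) (p : Int × Int × Int × Int) : Bool :=
  decide (p.1 < x) && decide (x < p.2.2.1)

def combine_frontier_alt (segs : List (Int × Int × Int × Int)) (x0 : Int) (x1 : Int) (frontier : List (Int × Int × Int × Int)) : List (Int × Int × Int × Int) :=
  -- Source B's clips call the module's interpolate (ported above); the ValueError adjacency
  -- check of Source B is value-preserving and excluded by Pre_, as in port A
  match frontier.find? (isStradAt x0), frontier.find? (isStradAt x1) with
  | none, none =>
      PySem.List.sorted
        (frontier.filter (fun p => decide (x1 ≤ p.1) || decide (p.2.2.1 ≤ x0)) ++ segs)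
        (fun p => p.1)
  | ml, mr =>
      frontier.filter (fun p => decide (p.2.2.1 ≤ x0))
      ++ (match ml with | some p => [(p.1, p.2.1, x0, interpolate p x0)] | none => [])
      ++ segs
      ++ (match mr with | some p => [(x1, interpolate p x1, p.2.2.1, p.2.2.2)] | none => [])
      ++ frontier.filter (fun p => decide (x1 ≤ p.1))

-- ===== PRECONDITION & SPEC =====
-- Pre_ restricts to the function's documented domain: either no existing segment straddles
-- x0/x1 (and none spans both) and the sorted merged list is adjacency-valid (A's fallback
-- path), or the frontier is a contiguous chain of nondegenerate segments, some segment
-- straddles x0 or x1, and segs is a nonempty adjacency-valid chain spanning [x0, x1] with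
-- x0 < x1.  Outside Pre_ the Python A either raises ValueError / ZeroDivisionError at its
-- final checks, or returns an undocumented overlap-dependent value (see claim cite); the
-- adjacency/spanning conjuncts are exactly what keeps A from raising and are not otherwise
-- used by the equivalence proof.
def Pre_combine_frontier (segs : List (Int × Int × Int × Int)) (x0 : Int) (x1 : Int) (frontier : List (Int × Int × Int × Int)) : Prop :=
  ( (∀ p ∈ frontier, ¬(p.1 < x0 ∧ x0 < p.2.2.1) ∧ ¬(p.1 < x1 ∧ x1 < p.2.2.1) ∧
                     ¬(p.1 < x0 ∧ x1 < p.2.2.1))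
    ∧ List.IsChain (fun a b => b.1 ≤ a.2.2.1)
        (PySem.List.sorted
          (frontier.filter (fun p => decide (x1 ≤ p.1) || decide (p.2.2.1 ≤ x0)) ++ segs)
          (fun p => p.1)) )
  ∨
  ( x0 < x1
    ∧ (∀ p ∈ frontier, p.1 < p.2.2.1)
    ∧ List.IsChain (fun a b => b.1 = a.2.2.1) frontier
    ∧ (∃ p ∈ frontier, (p.1 < x0 ∧ x0 < p.2.2.1) ∨ (p.1 < x1 ∧ x1 < p.2.2.1))
    ∧ segs ≠ []
    ∧ (∀ s ∈ segs, s.1 < s.2.2.1)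
    ∧ List.IsChain (fun a b => b.1 ≤ a.2.2.1) segs
    ∧ (∀ s ∈ segs.head?, s.1 ≤ x0)
    ∧ (∀ s ∈ segs.getLast?, x1 ≤ s.2.2.1) )
instance (segs : List (Int × Int × Int × Int)) (x0 : Int) (x1 : Int) (frontier : List (Int × Int × Int × Int)) : Decidable (Pre_combine_frontier segs x0 x1 frontier) := by unfold Pre_combine_frontier; infer_instance

def pvWitness_combine_frontier : (List (Int × Int × Int × Int)) × Int × Int × (List (Int × Int × Int × Int)) :=
  ([(1, 5, 3, 5)], 1, 3, [(0, 0, 2, 2)])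

def Spec_combine_frontier (segs : List (Int × Int × Int × Int)) (x0 : Int) (x1 : Int) (frontier : List (Int × Int × Int × Int)) (out : List (Int × Int × Int × Int)) : Prop := out = combine_frontier_alt segs x0 x1 frontier
instance (segs : List (Int × Int × Int × Int)) (x0 : Int) (x1 : Int) (frontier : List (Int × Int × Int × Int)) (out : List (Int × Int × Int × Int)) : Decidable (Spec_combine_frontier segs x0 x1 frontier out) := by unfold Spec_combine_frontier; infer_instance

-- ===== CLAIM (what is proved, stated in full; the proofs are below) =====
def Claim_equal_combine_frontier : Prop := ∀ (segs : List (Int × Int × Int × Int)) (x0 : Int) (x1 : Int) (frontier : List (Int × Int × Int × Int)), Dom_combine_frontier segs x0 x1 frontier → Pre_combine_frontier segs x0 x1 frontier → Spec_combine_frontier segs x0 x1 frontier (combine_frontier segs x0 x1 frontier)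

-- ===== LEMMAS AND PROOFS =====

theorem isStradAt_eq_true {x : Int} {p : Int × Int × Int × Int} :
    isStradAt x p = true ↔ (p.1 < x ∧ x < p.2.2.1) := by
  simp [isStradAt]

-- small bridges between the ∀-facts and B's filter/find? expressions
theorem filterL_nil (x0 : Int) (F : List (Int × Int × Int × Int))
    (h : ∀ q ∈ F, ¬(q.2.2.1 ≤ x0)) :
    F.filter (fun p => decide (p.2.2.1 ≤ x0)) = [] :=
  List.filter_eq_nil_iff.2 (fun q hq => by simpa using h q hq)

theorem filterR_self (x1 : Int) (F : List (Int × Int × Int × Int))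
    (h : ∀ q ∈ F, x1 ≤ q.1) :
    F.filter (fun p => decide (x1 ≤ p.1)) = F :=
  List.filter_eq_self.2 (fun q hq => by simpa using h q hq)

theorem findStrad_none (x : Int) (F : List (Int × Int × Int × Int))
    (h : ∀ q ∈ F, ¬(q.1 < x ∧ x < q.2.2.1)) :
    F.find? (isStradAt x) = none :=
  List.find?_eq_none.2 (fun q hq => by simpa [isStradAt_eq_true] using h q hq)

-- the four shapes one stepA iteration can take
theorem stepA_keep (segs : List (Int × Int × Int × Int)) (x0 x1 : Int)
    (st : List (Int × Int × Int × Int) × Bool) (p : Int × Int × Int × Int)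
    (h1 : ¬(p.1 < x0 ∧ x1 < p.2.2.1)) (h2 : ¬(p.1 < x0 ∧ x0 < p.2.2.1))
    (h3 : ¬(p.1 < x1 ∧ x1 < p.2.2.1)) (h4 : x1 ≤ p.1 ∨ p.2.2.1 ≤ x0) :
    stepA segs x0 x1 st p = (st.1 ++ [p], st.2) := by
  unfold stepA; rw [if_neg h1, if_neg h2, if_neg h3, if_pos h4]

theorem stepA_drop (segs : List (Int × Int × Int × Int)) (x0 x1 : Int)
    (st : List (Int × Int × Int × Int) × Bool) (p : Int × Int × Int × Int)
    (h1 : ¬(p.1 < x0 ∧ x1 < p.2.2.1)) (h2 : ¬(p.1 < x0 ∧ x0 < p.2.2.1))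
    (h3 : ¬(p.1 < x1 ∧ x1 < p.2.2.1)) (h4 : ¬(x1 ≤ p.1 ∨ p.2.2.1 ≤ x0)) :
    stepA segs x0 x1 st p = st := by
  unfold stepA; rw [if_neg h1, if_neg h2, if_neg h3, if_neg h4]

theorem stepA_b1 (segs : List (Int × Int × Int × Int)) (x0 x1 : Int)
    (st : List (Int × Int × Int × Int) × Bool) (p : Int × Int × Int × Int)
    (h1 : p.1 < x0 ∧ x1 < p.2.2.1) :
    stepA segs x0 x1 st p =
      (st.1 ++ [(p.1, p.2.1, x0, interpolate p x0)] ++ segs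
            ++ [(x1, interpolate p x1, p.2.2.1, p.2.2.2)], true) := by
  unfold stepA
  rw [if_pos h1, if_pos (show p.1 ≠ x0 by omega), if_pos (show p.2.2.1 ≠ x1 by omega)]

theorem stepA_b2 (segs : List (Int × Int × Int × Int)) (x0 x1 : Int)
    (st : List (Int × Int × Int × Int) × Bool) (p : Int × Int × Int × Int)
    (h1 : ¬(p.1 < x0 ∧ x1 < p.2.2.1)) (h2 : p.1 < x0 ∧ x0 < p.2.2.1) :
    stepA segs x0 x1 st p =
      (st.1 ++ [(p.1, p.2.1, x0, interpolate p x0)] ++ (if st.2 then [] else segs), true) := by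
  unfold stepA
  rw [if_neg h1, if_pos h2, if_pos (show p.1 ≠ x0 by omega)]

theorem stepA_b3 (segs : List (Int × Int × Int × Int)) (x0 x1 : Int)
    (st : List (Int × Int × Int × Int) × Bool) (p : Int × Int × Int × Int)
    (h1 : ¬(p.1 < x0 ∧ x1 < p.2.2.1)) (h2 : ¬(p.1 < x0 ∧ x0 < p.2.2.1))
    (h3 : p.1 < x1 ∧ x1 < p.2.2.1) :
    stepA segs x0 x1 st p =
      (st.1 ++ (if st.2 then [] else segs)
            ++ [(x1, interpolate p x1, p.2.2.1, p.2.2.2)], true) := by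
  unfold stepA
  rw [if_neg h1, if_neg h2, if_pos h3, if_pos (show p.2.2.1 ≠ x1 by omega)]

-- in a contiguous chain of nondegenerate segments, a lower bound on the head's start
-- bounds every start
theorem chain_lb (F : List (Int × Int × Int × Int)) (b : Int)
    (hc : List.IsChain (fun a c => c.1 = a.2.2.1) F)
    (hpos : ∀ p ∈ F, p.1 < p.2.2.1)
    (hh : ∀ p ∈ F.head?, b ≤ p.1) : ∀ q ∈ F, b ≤ q.1 := by
  induction F generalizing b with
  | nil => intro q hq; cases hq
  | cons p F ih =>
    rw [List.isChain_cons] at hc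
    intro q hq
    rcases List.mem_cons.1 hq with rfl | hq
    · exact hh q rfl
    · exact ih b hc.2 (fun r hr => hpos r (List.mem_cons_of_mem _ hr)) (fun r hr => by
        have := hc.1 r hr
        have hp := hpos p (List.mem_cons_self ..)
        have hb := hh p rfl
        omega) q hq

-- A's loop appends unchanged every segment that starts at or after x1
theorem foldA_R (segs : List (Int × Int × Int × Int)) (x0 x1 : Int) (hx : x0 < x1) :
    ∀ (F : List (Int × Int × Int × Int)) (st : List (Int × Int × Int × Int) × Bool),
      (∀ p ∈ F, x1 ≤ p.1) →
      F.foldl (stepA segs x0 x1) st = (st.1 ++ F, st.2) := by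
  intro F
  induction F with
  | nil => intro st _; simp
  | cons p F ih =>
    intro st h
    have hp := h p (List.mem_cons_self ..)
    rw [List.foldl_cons,
        stepA_keep segs x0 x1 st p (by omega) (by omega) (by omega) (by omega),
        ih _ (fun q hq => h q (List.mem_cons_of_mem _ hq))]
    simp

-- A's loop after segs have been inserted (added = true), on a chain lying right of x0:
-- it emits the right clip at the x1-straddler and keeps the segments right of x1
theorem foldA_phase2 (segs : List (Int × Int × Int × Int)) (x0 x1 : Int) (hx : x0 < x1) :
    ∀ (F : List (Int × Int × Int × Int)) (nf : List (Int × Int × Int × Int)),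
      (∀ p ∈ F, x0 < p.1) → (∀ p ∈ F, p.1 < p.2.2.1) →
      List.IsChain (fun a c => c.1 = a.2.2.1) F →
      F.foldl (stepA segs x0 x1) (nf, true) =
        (nf ++ (match F.find? (isStradAt x1) with
                | some p => [(x1, interpolate p x1, p.2.2.1, p.2.2.2)]
                | none => [])
            ++ F.filter (fun p => decide (x1 ≤ p.1)), true) := by
  intro F
  induction F with
  | nil => intro nf _ _ _; simp
  | cons p F ih =>
    intro nf h0 hpos hc
    have hp0 := h0 p (List.mem_cons_self ..)
    have hpp := hpos p (List.mem_cons_self ..)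
    rw [List.isChain_cons] at hc
    by_cases hR : x1 ≤ p.1
    · have hall : ∀ q ∈ p :: F, x1 ≤ q.1 := by
        apply chain_lb _ x1 (List.isChain_cons.2 hc) hpos
        intro r hr; simp at hr; subst hr; omega
      rw [foldA_R segs x0 x1 hx _ _ hall]
      rw [findStrad_none x1 _ (fun q hq => by have := hall q hq; omega)]
      rw [filterR_self x1 _ (fun q hq => hall q hq)]
      simp
    · have hFlb : ∀ q ∈ F, p.2.2.1 ≤ q.1 :=
        chain_lb F p.2.2.1 hc.2 (fun r hr => hpos r (List.mem_cons_of_mem _ hr))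
          (fun r hr => le_of_eq (hc.1 r hr).symm)
      by_cases hS : x1 < p.2.2.1
      · -- the x1-straddler: right clip, then everything lies right of x1
        rw [List.foldl_cons,
            stepA_b3 segs x0 x1 (nf, true) p (by omega) (by omega) ⟨by omega, hS⟩]
        have hallF : ∀ q ∈ F, x1 ≤ q.1 := fun q hq => by have := hFlb q hq; omega
        rw [foldA_R segs x0 x1 hx _ _ hallF]
        rw [List.find?_cons_of_pos (by simp [isStradAt_eq_true]; omega)]
        rw [List.filter_cons_of_neg (by simp; omega),
            filterR_self x1 F hallF]
        simp
      · -- dropped: x0 < p.1 < p.2.2.1 ≤ x1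
        rw [List.foldl_cons,
            stepA_drop segs x0 x1 (nf, true) p (by omega) (by omega) (by omega) (by omega)]
        rw [ih nf (fun q hq => by have := hFlb q hq; omega)
              (fun q hq => hpos q (List.mem_cons_of_mem _ hq)) hc.2]
        rw [List.find?_cons_of_neg (by simp [isStradAt_eq_true]; omega),
            List.filter_cons_of_neg (by simp; omega)]

-- A's loop before any straddler, on a contiguous chain containing one: it keeps the
-- segments left of x0, inserts the clips and segs at the straddlers, keeps the right side
theorem foldA_phase1 (segs : List (Int × Int × Int × Int)) (x0 x1 : Int) (hx : x0 < x1) :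
    ∀ (F : List (Int × Int × Int × Int)) (nf : List (Int × Int × Int × Int)),
      (∀ p ∈ F, p.1 < p.2.2.1) →
      List.IsChain (fun a c => c.1 = a.2.2.1) F →
      (∃ p ∈ F, (p.1 < x0 ∧ x0 < p.2.2.1) ∨ (p.1 < x1 ∧ x1 < p.2.2.1)) →
      F.foldl (stepA segs x0 x1) (nf, false) =
        (nf ++ F.filter (fun p => decide (p.2.2.1 ≤ x0))
            ++ (match F.find? (isStradAt x0) with
                | some p => [(p.1, p.2.1, x0, interpolate p x0)]
                | none => [])
            ++ segs
            ++ (match F.find? (isStradAt x1) with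
                | some p => [(x1, interpolate p x1, p.2.2.1, p.2.2.2)]
                | none => [])
            ++ F.filter (fun p => decide (x1 ≤ p.1)), true) := by
  intro F
  induction F with
  | nil => intro nf _ _ hex; simp at hex
  | cons p F ih =>
    intro nf hpos hc hex
    have hpp := hpos p (List.mem_cons_self ..)
    rw [List.isChain_cons] at hc
    have hposF : ∀ q ∈ F, q.1 < q.2.2.1 := fun q hq => hpos q (List.mem_cons_of_mem _ hq)
    by_cases hL : p.2.2.1 ≤ x0
    · rw [List.foldl_cons,
          stepA_keep segs x0 x1 (nf, false) p (by omega) (by omega) (by omega) (Or.inr hL)]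
      have hexF : ∃ q ∈ F, (q.1 < x0 ∧ x0 < q.2.2.1) ∨ (q.1 < x1 ∧ x1 < q.2.2.1) := by
        rcases hex with ⟨q, hq, hs⟩
        rcases List.mem_cons.1 hq with rfl | hq
        · exact ((by rcases hs with ⟨h, h'⟩ | ⟨h, h'⟩ <;> omega : False)).elim
        · exact ⟨q, hq, hs⟩
      rw [ih _ hposF hc.2 hexF]
      rw [List.filter_cons_of_pos (by simp; omega),
          List.find?_cons_of_neg (show ¬isStradAt x0 p = true by simp [isStradAt_eq_true]; omega),
          List.find?_cons_of_neg (show ¬isStradAt x1 p = true by simp [isStradAt_eq_true]; omega),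
          List.filter_cons_of_neg (by simp; omega)]
      simp
    · have hFlb : ∀ q ∈ F, p.2.2.1 ≤ q.1 :=
        chain_lb F p.2.2.1 hc.2 hposF (fun r hr => le_of_eq (hc.1 r hr).symm)
      by_cases hSL : p.1 < x0
      · by_cases hB : x1 < p.2.2.1
        · -- one segment straddles both x0 and x1
          rw [List.foldl_cons, stepA_b1 segs x0 x1 (nf, false) p ⟨hSL, hB⟩]
          rw [foldA_R segs x0 x1 hx F _ (fun q hq => by have := hFlb q hq; omega)]
          rw [List.filter_cons_of_neg (by simp; omega),
              filterL_nil x0 F (fun q hq => by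
                have := hFlb q hq; have := hposF q hq; omega),
              List.find?_cons_of_pos (show isStradAt x0 p = true by
                simp [isStradAt_eq_true]; omega),
              List.find?_cons_of_pos (show isStradAt x1 p = true by
                simp [isStradAt_eq_true]; omega),
              List.filter_cons_of_neg (by simp; omega),
              filterR_self x1 F (fun q hq => by have := hFlb q hq; omega)]
          simp
        · -- left straddler only; afterwards segs are already inserted (phase2)
          rw [List.foldl_cons, stepA_b2 segs x0 x1 (nf, false) p (by omega) ⟨hSL, by omega⟩]
          rw [foldA_phase2 segs x0 x1 hx F _ (fun q hq => by have := hFlb q hq; omega) hposF hc.2]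
          rw [List.filter_cons_of_neg (by simp; omega),
              filterL_nil x0 F (fun q hq => by
                have := hFlb q hq; have := hposF q hq; omega),
              List.find?_cons_of_pos (show isStradAt x0 p = true by
                simp [isStradAt_eq_true]; omega),
              List.find?_cons_of_neg (show ¬isStradAt x1 p = true by
                simp [isStradAt_eq_true]; omega),
              List.filter_cons_of_neg (by simp; omega)]
          simp
      · by_cases hR : x1 ≤ p.1
        · -- the whole chain lies right of x1: contradicts the existing straddler
          have hall : ∀ q ∈ p :: F, x1 ≤ q.1 :=
            chain_lb _ x1 (List.isChain_cons.2 hc) hpos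
              (fun r hr => by simp at hr; subst hr; omega)
          exfalso
          rcases hex with ⟨q, hq, hs⟩
          have := hall q hq
          rcases hs with ⟨h, _⟩ | ⟨h, _⟩ <;> omega
        · by_cases hS : x1 < p.2.2.1
          · -- right straddler with no left straddler before it
            rw [List.foldl_cons,
                stepA_b3 segs x0 x1 (nf, false) p (by omega) (by omega) ⟨by omega, hS⟩]
            rw [foldA_R segs x0 x1 hx F _ (fun q hq => by have := hFlb q hq; omega)]
            rw [List.filter_cons_of_neg (by simp; omega),
                filterL_nil x0 F (fun q hq => by
                  have := hFlb q hq; have := hposF q hq; omega),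
                findStrad_none x0 (p :: F) (fun q hq => by
                  rcases List.mem_cons.1 hq with rfl | hq
                  · omega
                  · have := hFlb q hq; omega),
                List.find?_cons_of_pos (show isStradAt x1 p = true by
                  simp [isStradAt_eq_true]; omega),
                List.filter_cons_of_neg (by simp; omega),
                filterR_self x1 F (fun q hq => by have := hFlb q hq; omega)]
            simp
          · -- fully covered by [x0, x1]: dropped
            rw [List.foldl_cons,
                stepA_drop segs x0 x1 (nf, false) p (by omega) (by omega) (by omega) (by omega)]
            have hexF : ∃ q ∈ F, (q.1 < x0 ∧ x0 < q.2.2.1) ∨ (q.1 < x1 ∧ x1 < q.2.2.1) := by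
              rcases hex with ⟨q, hq, hs⟩
              rcases List.mem_cons.1 hq with rfl | hq
              · exact ((by rcases hs with ⟨h, h'⟩ | ⟨h, h'⟩ <;> omega : False)).elim
              · exact ⟨q, hq, hs⟩
            rw [ih nf hposF hc.2 hexF]
            rw [List.filter_cons_of_neg (by simp; omega),
                List.find?_cons_of_neg (show ¬isStradAt x0 p = true by
                  simp [isStradAt_eq_true]; omega),
                List.find?_cons_of_neg (show ¬isStradAt x1 p = true by
                  simp [isStradAt_eq_true]; omega),
                List.filter_cons_of_neg (by simp; omega)]

-- A's loop when no segment straddles x0 or x1 (and none spans both): it keeps exactly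
-- the segments outside (x0, x1), in order, and never inserts segs
theorem foldA_fallback (segs : List (Int × Int × Int × Int)) (x0 x1 : Int) :
    ∀ (F : List (Int × Int × Int × Int)) (nf : List (Int × Int × Int × Int)),
      (∀ p ∈ F, ¬(p.1 < x0 ∧ x0 < p.2.2.1) ∧ ¬(p.1 < x1 ∧ x1 < p.2.2.1) ∧
                ¬(p.1 < x0 ∧ x1 < p.2.2.1)) →
      F.foldl (stepA segs x0 x1) (nf, false) =
        (nf ++ F.filter (fun p => decide (x1 ≤ p.1) || decide (p.2.2.1 ≤ x0)), false) := by
  intro F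
  induction F with
  | nil => intro nf _; simp
  | cons p F ih =>
    intro nf h
    obtain ⟨h2, h3, h1⟩ := h p (List.mem_cons_self ..)
    have hF := fun q hq => h q (List.mem_cons_of_mem _ hq)
    by_cases h4 : x1 ≤ p.1 ∨ p.2.2.1 ≤ x0
    · rw [List.foldl_cons, stepA_keep segs x0 x1 (nf, false) p h1 h2 h3 h4, ih _ hF,
          List.filter_cons_of_pos (by simp; omega)]
      simp
    · rw [List.foldl_cons, stepA_drop segs x0 x1 (nf, false) p h1 h2 h3 h4, ih nf hF,
          List.filter_cons_of_neg (by simp; omega)]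

-- ===== VERDICT (by name: the statement is the Claim_ definition above) =====
theorem combine_frontier_spec : Claim_equal_combine_frontier := by
  intro segs x0 x1 frontier _ hpre
  unfold Spec_combine_frontier combine_frontier combine_frontier_alt
  rcases hpre with ⟨hnone, -⟩ | ⟨hx, hpos, hchain, hex, -⟩
  · rw [foldA_fallback segs x0 x1 frontier [] hnone]
    rw [findStrad_none x0 frontier (fun q hq => (hnone q hq).1),
        findStrad_none x1 frontier (fun q hq => (hnone q hq).2.1)]
    simp
  · rw [foldA_phase1 segs x0 x1 hx frontier [] hpos hchain hex]
    cases hml : frontier.find? (isStradAt x0) with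
    | none =>
      cases hmr : frontier.find? (isStradAt x1) with
      | none =>
        exfalso
        rcases hex with ⟨q, hq, hs⟩
        rcases hs with hs | hs
        · exact absurd (isStradAt_eq_true.2 hs) (by simpa using List.find?_eq_none.1 hml q hq)
        · exact absurd (isStradAt_eq_true.2 hs) (by simpa using List.find?_eq_none.1 hmr q hq)
      | some pr => simp
    | some pl =>
      cases hmr : frontier.find? (isStradAt x1) with
      | none => simp
      | some pr => simp
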